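-- pv_equiv track=rewrite | github.com/wraithmod/consult | src/pipeline.py | _extract_review_status
-- ===== SOURCE A (Python) =====
-- def _extract_review_status(stdout_text: str) -> str | None:
--     for line in reversed(stdout_text.splitlines()):
--         lower = line.strip().lower()
--         if not lower:
--             continue
--         if "approved" in lower:
--             return "Approved"
--         if "rejected" in lower:
--             return "Rejected"
--         if "quit" in lower:
--             return "Quit"
--     return None
-- ===== SOURCE B (Python) =====
-- _KEYWORDS = [("approved", "Approved"), ("rejected", "Rejected"), ("quit", "Quit")]
--
--
-- def _line_status(line):
--     lower = line.strip().lower()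
--     for kw, label in _KEYWORDS:
--         if kw in lower:
--             return label
--     return None
--
--
-- def _extract_review_status(stdout_text):
--     status = None
--     for line in stdout_text.splitlines():
--         s = _line_status(line)
--         if s is not None:
--             status = s
--     return status
-- ===== Notes on version B (the rewrite author's own statement) =====
-- stated objective: simpler
-- what changed: Forward single pass with a last-match-wins accumulator and a keyword table helper, instead of A's reversed scan with early return and hard-coded if-chain; the blank-line skip disappears.
import Mathlib
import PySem

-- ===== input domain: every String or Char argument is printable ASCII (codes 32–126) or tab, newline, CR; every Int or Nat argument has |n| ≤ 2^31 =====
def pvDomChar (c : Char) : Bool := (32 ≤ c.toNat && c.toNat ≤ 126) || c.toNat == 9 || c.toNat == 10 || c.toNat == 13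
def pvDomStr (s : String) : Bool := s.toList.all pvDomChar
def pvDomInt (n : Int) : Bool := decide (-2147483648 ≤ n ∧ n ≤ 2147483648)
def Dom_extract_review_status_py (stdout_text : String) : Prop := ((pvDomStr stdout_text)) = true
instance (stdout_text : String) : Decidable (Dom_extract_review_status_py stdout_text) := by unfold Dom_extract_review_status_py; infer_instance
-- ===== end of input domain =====

-- B replaces A's reversed scan with early return by a forward single pass with a
-- last-match-wins accumulator and a keyword-table helper (objective: simpler).


-- ===== PORT A =====
-- A's loop over reversed(splitlines): first non-empty line containing a keyword, priority in-line.
def extractLoopA : List String → Option String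
  | [] => none
  | line :: rest =>
    let lower := PySem.Str.lower (PySem.Str.strip line)
    if lower = "" then extractLoopA rest
    else if PySem.Str.isIn "approved" lower then some "Approved"
    else if PySem.Str.isIn "rejected" lower then some "Rejected"
    else if PySem.Str.isIn "quit" lower then some "Quit"
    else extractLoopA rest

def extract_review_status_py (stdout_text : String) : Option String :=
  extractLoopA (PySem.Str.splitlines stdout_text).reverse

-- ===== PORT B =====
def pvKeywords : List (String × String) :=
  [("approved", "Approved"), ("rejected", "Rejected"), ("quit", "Quit")]

-- B's helper _line_status: table loop with early return.
def pvTableLoop : List (String × String) → String → Option String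
  | [], _ => none
  | (kw, label) :: rest, lower =>
    if PySem.Str.isIn kw lower then some label else pvTableLoop rest lower

def pvLineStatus (line : String) : Option String :=
  pvTableLoop pvKeywords (PySem.Str.lower (PySem.Str.strip line))

def extract_review_status_py_alt (stdout_text : String) : Option String :=
  (PySem.Str.splitlines stdout_text).foldl
    (fun status line =>
      match pvLineStatus line with
      | some s => some s
      | none => status)
    none

-- ===== PRECONDITION & SPEC =====
def Spec_extract_review_status_py (stdout_text : String) (out : Option String) : Prop := out = extract_review_status_py_alt stdout_text
instance (stdout_text : String) (out : Option String) : Decidable (Spec_extract_review_status_py stdout_text out) := by unfold Spec_extract_review_status_py; infer_instance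

-- ===== CLAIM (what is proved, stated in full; the proofs are below) =====
def Claim_equal_extract_review_status_py : Prop := ∀ (stdout_text : String), Dom_extract_review_status_py stdout_text → Spec_extract_review_status_py stdout_text (extract_review_status_py stdout_text)

-- ===== LEMMAS AND PROOFS =====

-- A's per-line action agrees with B's table helper (the empty-line skip is absorbed:
-- no keyword occurs in the empty string).
lemma loopA_cons (line : String) (rest : List String) :
    extractLoopA (line :: rest) =
      (match pvLineStatus line with
       | some s => some s
       | none => extractLoopA rest) := by
  simp only [extractLoopA, pvLineStatus, pvTableLoop, pvKeywords]
  by_cases h : PySem.Str.lower (PySem.Str.strip line) = ""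
  · simp [h, PySem.Chars.isIn, PySem.Chars.find, PySem.Chars.find.go]
  · simp only [if_neg h]
    split_ifs <;> simp_all

lemma loopA_append (xs ys : List String) :
    extractLoopA (xs ++ ys) =
      (match extractLoopA xs with
       | some s => some s
       | none => extractLoopA ys) := by
  induction xs with
  | nil => simp [extractLoopA]
  | cons l rest ih =>
    rw [List.cons_append, loopA_cons, loopA_cons]
    cases pvLineStatus l <;> simp [ih]

lemma foldl_eq_loopA_reverse (ls : List String) (acc : Option String) :
    ls.foldl
      (fun status line =>
        match pvLineStatus line with
        | some s => some s
        | none => status)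
      acc =
      (match extractLoopA ls.reverse with
       | some s => some s
       | none => acc) := by
  induction ls generalizing acc with
  | nil => simp [extractLoopA]
  | cons l rest ih =>
    simp only [List.foldl_cons, List.reverse_cons]
    rw [ih, loopA_append, loopA_cons]
    cases h : extractLoopA rest.reverse <;> cases h' : pvLineStatus l <;>
      simp [extractLoopA]

-- ===== VERDICT (by name: the statement is the Claim_ definition above) =====
theorem extract_review_status_py_spec : Claim_equal_extract_review_status_py := by
  intro s _
  unfold Spec_extract_review_status_py extract_review_status_py extract_review_status_py_alt
  rw [foldl_eq_loopA_reverse]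
  cases extractLoopA (PySem.Str.splitlines s).reverse <;> rfl
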